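-- pv_equiv track=rewrite | github.com/wukong930/Zeus | backend/app/services/event_intelligence/resolver.py | _compact_evidence
-- ===== SOURCE A (Python) =====
-- def _compact_evidence(values: list[str]) -> list[str]:
--     items: list[str] = []
--     for value in values:
--         text = str(value).strip()
--         if not text:
--             continue
--         items.append(text[:600])
--     return list(dict.fromkeys(items))[:8]
-- ===== SOURCE B (Python) =====
-- def _compact_evidence(values: list[str]) -> list[str]:
--     # dedup by nub-recursion: pick the first usable item, erase its future
--     # duplicates from the remainder, recurse for the next slot (at most 8).
--     def norm(value):
--         text = str(value).strip()
--         return text[:600] if text else None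
--
--     def pick(rest, k):
--         if k == 0:
--             return []
--         for i, head in enumerate(rest):
--             if head is not None:
--                 return [head] + pick([x for x in rest[i + 1:] if x != head], k - 1)
--         return []
--
--     return pick([norm(v) for v in values], 8)
-- ===== Notes on version B (the rewrite author's own statement) =====
-- stated objective: alternative
-- what changed: Replaces the collect-then-dict.fromkeys-then-slice pipeline by a nub-by-filter recursion: normalize every value once, then recursively pick the next distinct item and delete its future duplicates from the remainder, stopping after 8 picks; no dict or seen-set is kept.
import Mathlib
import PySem

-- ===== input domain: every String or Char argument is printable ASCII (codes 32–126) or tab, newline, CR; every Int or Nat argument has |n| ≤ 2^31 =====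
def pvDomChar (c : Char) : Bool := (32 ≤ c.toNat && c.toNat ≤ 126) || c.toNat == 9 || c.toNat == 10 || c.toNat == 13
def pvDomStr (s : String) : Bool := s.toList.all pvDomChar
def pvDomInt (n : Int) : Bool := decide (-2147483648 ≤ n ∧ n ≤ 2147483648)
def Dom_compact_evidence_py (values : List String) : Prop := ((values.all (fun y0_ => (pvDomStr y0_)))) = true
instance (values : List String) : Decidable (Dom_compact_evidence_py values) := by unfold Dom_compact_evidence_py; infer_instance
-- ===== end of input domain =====

-- B replaces A's collect / dict.fromkeys / slice pipeline by a nub-by-filter recursion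
-- (pick the next distinct normalized item, erase its future duplicates, at most 8 picks);
-- objective: alternative.

-- ===== PORT A =====
def compact_evidence_py (values : List String) : List String :=
  let items : List String :=
    values.foldl (fun items value =>
      let text := PySem.Str.strip value
      if text = "" then items
      else items ++ [PySem.Str.slice text none (some 600)]) []
  PySem.List.slice (PySem.List.dedup items) none (some 8)

-- ===== PORT B =====
/-- B's `norm`: stripped text truncated to 600, `none` when empty. -/
def pvNorm (value : String) : Option String :=
  let text := PySem.Str.strip value
  if text = "" then none else some (PySem.Str.slice text none (some 600))

/-- B's `pick`: scan to the first non-`none` item (the `for`/`enumerate` loop),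
    emit it, recurse on the remainder with its duplicates filtered out. -/
def pvPick : List (Option String) → Nat → List String
  | _, 0 => []
  | [], _ + 1 => []
  | none :: rest, k + 1 => pvPick rest (k + 1)
  | some head :: rest, k + 1 =>
      head :: pvPick (rest.filter (fun x => x ≠ some head)) k
termination_by rest _ => rest.length
decreasing_by
  · simp
  · simp only [List.length_unattach]
    exact Nat.lt_succ_of_le (le_trans (List.length_filter_le _ _) List.length_attach.le)

def compact_evidence_py_alt (values : List String) : List String :=
  pvPick (values.map pvNorm) 8

-- ===== PRECONDITION & SPEC =====
def Spec_compact_evidence_py (values : List String) (out : List String) : Prop := out = compact_evidence_py_alt values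
instance (values : List String) (out : List String) : Decidable (Spec_compact_evidence_py values out) := by unfold Spec_compact_evidence_py; infer_instance

-- ===== CLAIM =====
def Claim_equal_compact_evidence_py : Prop := ∀ (values : List String), Dom_compact_evidence_py values → Spec_compact_evidence_py values (compact_evidence_py values)

-- ===== LEMMAS AND PROOFS =====

/-- Nub by filtering (first occurrences). -/
def pvNubF : List String → List String
  | [] => []
  | x :: xs => x :: pvNubF (xs.filter (fun y => y ≠ x))
termination_by xs => xs.length
decreasing_by
  simp only [List.length_unattach]
  exact Nat.lt_succ_of_le (le_trans (List.length_filter_le _ _) List.length_attach.le)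

/-- `pvPick` without the fuel bound. -/
def pvNubOpt : List (Option String) → List String
  | [] => []
  | none :: rest => pvNubOpt rest
  | some head :: rest => head :: pvNubOpt (rest.filter (fun x => x ≠ some head))
termination_by rest => rest.length
decreasing_by
  · simp
  · simp only [List.length_unattach]
    exact Nat.lt_succ_of_le (le_trans (List.length_filter_le _ _) List.length_attach.le)

theorem pvPick_eq_take_aux (n : Nat) :
    ∀ (os : List (Option String)), os.length ≤ n → ∀ (k : Nat),
      pvPick os k = (pvNubOpt os).take k := by
  induction n with
  | zero =>
      intro os h k
      have : os = [] := List.eq_nil_of_length_eq_zero (Nat.le_zero.mp h)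
      subst this; cases k <;> simp [pvPick.eq_1, pvPick.eq_2, pvNubOpt.eq_1]
  | succ n ih =>
      intro os h k
      match os, k with
      | [], k2 => cases k2 <;> simp [pvPick.eq_1, pvPick.eq_2, pvNubOpt.eq_1]
      | _ :: _, 0 => simp [pvPick.eq_1]
      | none :: rest, k + 1 =>
          rw [pvPick.eq_3, pvNubOpt.eq_2]
          exact ih rest (by simpa using Nat.le_of_succ_le_succ h) (k + 1)
      | some head :: rest, k + 1 =>
          rw [pvPick.eq_4, pvNubOpt.eq_3, List.take_succ_cons]
          exact congrArg (head :: ·)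
            (ih _ (le_trans (List.length_filter_le _ _)
              (by simpa using Nat.le_of_succ_le_succ h)) k)

theorem pvPick_eq_take (os : List (Option String)) (k : Nat) :
    pvPick os k = (pvNubOpt os).take k :=
  pvPick_eq_take_aux os.length os le_rfl k

theorem pvFilter_filterMap (head : String) (rest : List (Option String)) :
    (rest.filter (fun x => x ≠ some head)).filterMap id
      = (rest.filterMap id).filter (fun y => y ≠ head) := by
  induction rest with
  | nil => simp
  | cons o os ih2 =>
      cases o with
      | none => simpa using ih2
      | some a =>
          by_cases h : a = head <;>
            · simp only [List.filter_cons, List.filterMap_cons, h]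
              simpa [h] using ih2

theorem pvNubOpt_eq_nubF_aux (n : Nat) :
    ∀ (os : List (Option String)), os.length ≤ n →
      pvNubOpt os = pvNubF (os.filterMap id) := by
  induction n with
  | zero =>
      intro os h
      have : os = [] := List.eq_nil_of_length_eq_zero (Nat.le_zero.mp h)
      subst this; simp [pvNubOpt.eq_1, pvNubF.eq_1]
  | succ n ih =>
      intro os h
      match os with
      | [] => simp [pvNubOpt.eq_1, pvNubF.eq_1]
      | none :: rest =>
          rw [pvNubOpt.eq_2, List.filterMap_cons]
          exact ih rest (by simpa using Nat.le_of_succ_le_succ h)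
      | some head :: rest =>
          rw [pvNubOpt.eq_3, List.filterMap_cons,
            ih _ (le_trans (List.length_filter_le _ _)
              (by simpa using Nat.le_of_succ_le_succ h))]
          simp only [id_eq]
          rw [pvNubF.eq_2]
          exact congrArg (fun l => head :: pvNubF l) (pvFilter_filterMap head rest)

theorem pvNubOpt_eq_nubF (os : List (Option String)) :
    pvNubOpt os = pvNubF (os.filterMap id) :=
  pvNubOpt_eq_nubF_aux os.length os le_rfl

/-- A's collecting loop equals `filterMap pvNorm`. -/
theorem pvFoldl_eq_filterMap (vs : List String) (acc : List String) :
    vs.foldl (fun items value =>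
      let text := PySem.Str.strip value
      if text = "" then items
      else items ++ [PySem.Str.slice text none (some 600)]) acc
    = acc ++ vs.filterMap pvNorm := by
  induction vs generalizing acc with
  | nil => simp
  | cons v vs ih =>
    simp only [List.foldl_cons, List.filterMap_cons]
    by_cases h : PySem.Str.strip v = "" <;> simp [pvNorm, h, ih]

/-- Seen-list dedup (what `PySem.Set.ofList` computes), with escape list. -/
def pvDedupEx (seen : List String) : List String → List String
  | [] => []
  | x :: xs => if x ∈ seen then pvDedupEx seen xs else x :: pvDedupEx (seen ++ [x]) xs

theorem pvFoldlAdd_eq (xs : List String) (seen : List String) :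
    xs.foldl PySem.Set.add seen = seen ++ pvDedupEx seen xs := by
  induction xs generalizing seen with
  | nil => simp [pvDedupEx]
  | cons x xs ih =>
    rw [List.foldl_cons, pvDedupEx]
    by_cases h : x ∈ seen
    · have ha : PySem.Set.add seen x = seen := by
        simp [PySem.Set.add, PySem.Set.contains, h]
      rw [ha, if_pos h]; exact ih seen
    · have ha : PySem.Set.add seen x = seen ++ [x] := by
        simp [PySem.Set.add, PySem.Set.contains, h]
      rw [ha, if_neg h, ih (seen ++ [x])]; simp

theorem pvDedupEx_eq_nubF_aux (n : Nat) :
    ∀ (xs : List String), xs.length ≤ n → ∀ (seen : List String),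
      pvDedupEx seen xs = pvNubF (xs.filter (fun x => x ∉ seen)) := by
  induction n with
  | zero =>
      intro xs h seen
      have : xs = [] := List.eq_nil_of_length_eq_zero (Nat.le_zero.mp h)
      subst this; simp [pvDedupEx, pvNubF.eq_1]
  | succ n ih =>
      intro xs h seen
      match xs with
      | [] => simp [pvDedupEx, pvNubF.eq_1]
      | x :: xs =>
          have hxs : xs.length ≤ n := by simpa using Nat.le_of_succ_le_succ h
          rw [pvDedupEx, List.filter_cons]
          by_cases hx : x ∈ seen
          · rw [if_pos hx]
            simp only [hx, not_true_eq_false, decide_false, Bool.false_eq_true,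
              if_false]
            exact ih xs hxs seen
          · rw [if_neg hx]
            simp only [hx, not_false_eq_true, decide_true, if_true]
            rw [pvNubF.eq_2, ih xs hxs (seen ++ [x]), List.filter_filter]
            congr 2
            exact List.filter_congr fun y _ => by
              by_cases hy : y = x <;> simp [hy, List.mem_append]

theorem pvDedupEx_eq_nubF (xs : List String) (seen : List String) :
    pvDedupEx seen xs = pvNubF (xs.filter (fun x => x ∉ seen)) :=
  pvDedupEx_eq_nubF_aux xs.length xs le_rfl seen

/-- dict.fromkeys dedup equals nub-by-filter. -/
theorem pvDedup_eq_nubF (xs : List String) :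
    PySem.List.dedup xs = pvNubF xs := by
  rw [PySem.List.dedup_eq_ofList, PySem.Set.ofList_eq_foldl, pvFoldlAdd_eq,
    List.nil_append, pvDedupEx_eq_nubF]
  simp

-- ===== VERDICT =====
theorem compact_evidence_py_spec : Claim_equal_compact_evidence_py := by
  intro values _
  unfold Spec_compact_evidence_py compact_evidence_py compact_evidence_py_alt
  simp only [pvFoldl_eq_filterMap, List.nil_append]
  rw [pvDedup_eq_nubF, show (8:Int) = ((8:Nat):Int) from rfl,
    PySem.List.slice_to_natCast, pvPick_eq_take, pvNubOpt_eq_nubF,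
    List.filterMap_map]
  simp
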